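-- pv_equiv track=rewrite | github.com/dtyq/magic | backend/super-magic/app/tools/design/tools/search_canvas_images.py | _generate_element_names
-- ===== SOURCE A (Python) =====
-- from typing import Any, Dict, List, Optional
--
-- def _generate_element_names(image_infos: List[Dict]) -> List[str]:
--     """按 requirement_name 分组生成元素名称，多张图自动加 _1 _2 后缀"""
--     from collections import Counter
--
--     name_counts: Counter = Counter(info["requirement_name"] for info in image_infos)
--     name_counters: Dict[str, int] = {}
--     names = []
--     for info in image_infos:
--         req_name = info["requirement_name"]
--         if name_counts[req_name] == 1:
--             names.append(req_name)
--         else: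
--             name_counters[req_name] = name_counters.get(req_name, 0) + 1
--             names.append(f"{req_name}_{name_counters[req_name]}")
--     return names
-- ===== SOURCE B (Python) =====
-- from typing import Any, Dict, List, Optional
--
-- def _generate_element_names(image_infos: List[Dict]) -> List[str]:
--     """Invert-then-scatter: group positions by name, then fill a result array
--     group by group (bare name for singleton groups, name_k otherwise)."""
--     groups: Dict[str, List[int]] = {}
--     for i, info in enumerate(image_infos):
--         groups.setdefault(info["requirement_name"], []).append(i)
--     result = [""] * len(image_infos)
--     for name, positions in groups.items():
--         if len(positions) == 1:
--             result[positions[0]] = name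
--         else:
--             for k, pos in enumerate(positions, 1):
--                 result[pos] = f"{name}_{k}"
--     return result
-- ===== Notes on version B (the rewrite author's own statement) =====
-- stated objective: alternative
-- what changed: Replaces A's single streaming pass with running per-name counters by a two-phase invert-then-scatter: first build a dict mapping each name to the ordered list of its positions, then fill a preallocated result array group by group (bare name for singleton groups, name_k for position k in larger groups).
import Mathlib
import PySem

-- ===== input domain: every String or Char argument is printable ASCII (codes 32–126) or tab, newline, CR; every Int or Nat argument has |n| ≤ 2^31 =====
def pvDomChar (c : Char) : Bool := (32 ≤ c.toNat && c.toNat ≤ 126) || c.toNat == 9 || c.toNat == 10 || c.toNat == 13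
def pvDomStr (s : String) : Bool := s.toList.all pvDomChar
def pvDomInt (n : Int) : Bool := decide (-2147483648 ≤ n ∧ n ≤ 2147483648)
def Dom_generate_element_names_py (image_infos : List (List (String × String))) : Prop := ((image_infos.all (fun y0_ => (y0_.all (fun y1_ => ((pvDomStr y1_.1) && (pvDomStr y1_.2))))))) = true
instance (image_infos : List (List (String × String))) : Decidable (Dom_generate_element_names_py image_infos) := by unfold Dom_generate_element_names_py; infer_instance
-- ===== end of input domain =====

-- B replaces A's single streaming pass with running per-name counters by a two-phase
-- invert-then-scatter: group positions by name, then fill a preallocated result array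
-- group by group; objective: alternative (same cost, different data flow).


-- ===== PORT A =====
-- info["requirement_name"]: first-match lookup; Pre_ guarantees the key is present,
-- so the `.getD ""` default is never taken on admitted inputs.
def pvReq (info : List (String × String)) : String :=
  ((PySem.Dict.mk info).get? "requirement_name").getD ""

def generate_element_names_py (image_infos : List (List (String × String))) : List String :=
  -- name_counts = Counter(info["requirement_name"] for info in image_infos)
  let name_counts : PySem.Dict String Int :=
    PySem.Dict.counter (image_infos.map (fun info => pvReq info))
  -- for info in image_infos: … (state = (name_counters, names))
  (image_infos.foldl
    (fun (st : PySem.Dict String Int × List String) info =>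
      let req := pvReq info
      if name_counts.getD req 0 = 1 then
        (st.1, st.2 ++ [req])
      else
        let c := st.1.getD req 0 + 1
        (st.1.insert req c, st.2 ++ [req ++ "_" ++ PySem.Int.toStr c]))
    (PySem.Dict.empty, [])).2

-- ===== PORT B =====
-- The scatter step for one group (name, positions): a singleton group writes the
-- bare name at its position, a larger group writes name_k at position k (k from 1).
def pvScatter (res : List String) (q : String × List Nat) : List String :=
  match q.2 with
  | [p] => res.set p q.1
  | ps => (ps.zipIdx 1).foldl
      (fun r t => r.set t.1 (q.1 ++ "_" ++ PySem.Int.toStr (t.2 : Int))) res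

def generate_element_names_py_alt (image_infos : List (List (String × String))) : List String :=
  let names := image_infos.map (fun info => pvReq info)
  -- for i, info in enumerate(image_infos): groups.setdefault(name, []).append(i)
  -- (enumerate's nonnegative index is a Nat; zipIdx pairs each name with its index)
  let groups : PySem.Dict String (List Nat) :=
    (names.zipIdx).foldl (fun g p => g.modify p.1 [] (· ++ [p.2])) PySem.Dict.empty
  -- result = [""] * len(image_infos); for name, positions in groups.items(): scatter
  groups.items.foldl pvScatter (List.replicate image_infos.length "")

-- ===== PRECONDITION & SPEC =====
-- Pre_ excludes exactly the inputs where some info dict lacks the key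
-- "requirement_name", on which Python A (and B) raise KeyError.
def Pre_generate_element_names_py (image_infos : List (List (String × String))) : Prop :=
  ∀ info ∈ image_infos, ((PySem.Dict.mk info).get? "requirement_name").isSome
instance (image_infos : List (List (String × String))) : Decidable (Pre_generate_element_names_py image_infos) := by unfold Pre_generate_element_names_py; infer_instance

def pvWitness_generate_element_names_py : (List (List (String × String))) :=
  [[("requirement_name", "a")], [("requirement_name", "a")], [("requirement_name", "b")]]

def Spec_generate_element_names_py (image_infos : List (List (String × String))) (out : List String) : Prop := out = generate_element_names_py_alt image_infos
instance (image_infos : List (List (String × String))) (out : List String) : Decidable (Spec_generate_element_names_py image_infos out) := by unfold Spec_generate_element_names_py; infer_instance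

-- ===== CLAIM (what is proved, stated in full; the proofs are below) =====
def Claim_equal_generate_element_names_py : Prop := ∀ (image_infos : List (List (String × String))), Dom_generate_element_names_py image_infos → Pre_generate_element_names_py image_infos → Spec_generate_element_names_py image_infos (generate_element_names_py image_infos)

-- ===== LEMMAS AND PROOFS =====

-- the common reference result, positionally: entry i of the output
def pvTarget (names : List String) (i : Nat) : String :=
  if names.count (names.getD i "") = 1 then names.getD i ""
  else names.getD i "" ++ "_" ++ PySem.Int.toStr (((names.take (i + 1)).count (names.getD i "") : Nat) : Int)

-- common reference result as a list: walk the remaining names, `pre` = names already processed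
def pvSpecList (total : List String) : List String → List String → List String
  | _, [] => []
  | pre, n :: suf =>
    (if total.count n = 1 then n
     else n ++ "_" ++ PySem.Int.toStr ((pre.count n : Nat) + 1)) :: pvSpecList total (pre ++ [n]) suf

-- A's loop, from a counter state that agrees with `pre` on all non-unique names,
-- produces pvSpecList.
theorem pvA_loop (total : List String) (suf : List (List (String × String))) :
    ∀ (pre out : List String) (ctr : PySem.Dict String Int),
      (∀ m, total.count m ≠ 1 → ctr.getD m 0 = (pre.count m : Int)) →
      ((suf.foldl
        (fun (st : PySem.Dict String Int × List String) info =>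
          if ((total.count (pvReq info) : Nat) : Int) = 1 then
            (st.1, st.2 ++ [pvReq info])
          else
            (st.1.insert (pvReq info) (st.1.getD (pvReq info) 0 + 1),
             st.2 ++ [pvReq info ++ "_" ++ PySem.Int.toStr (st.1.getD (pvReq info) 0 + 1)]))
        (ctr, out)).2) = out ++ pvSpecList total pre (suf.map (fun info => pvReq info)) := by
  induction suf with
  | nil => intro pre out ctr _; simp [pvSpecList]
  | cons info suf ih =>
    intro pre out ctr hinv
    simp only [List.foldl_cons, List.map_cons, pvSpecList]
    by_cases h1 : total.count (pvReq info) = 1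
    · rw [if_pos (by exact_mod_cast h1), if_pos h1]
      rw [ih (pre ++ [pvReq info]) (out ++ [pvReq info]) ctr ?_]
      · simp
      · intro m hm
        rcases eq_or_ne m (pvReq info) with rfl | hne
        · exact absurd h1 hm
        · rw [hinv m hm]
          simp [List.count_append, Ne.symm hne]
    · rw [if_neg (by exact_mod_cast h1), if_neg h1, hinv (pvReq info) h1]
      rw [ih (pre ++ [pvReq info]) _ _ ?_]
      · simp
      · intro m _
        rw [PySem.Dict.getD_insert]
        rcases eq_or_ne m (pvReq info) with rfl | hne
        · simp [List.count_append]
        · rw [if_neg hne, hinv m (by assumption)]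
          simp [List.count_append, Ne.symm hne]

-- pvSpecList, written positionally over range'
theorem pvSpec_eq_range (names : List String) (suf : List String) :
    ∀ k, names.drop k = suf →
      pvSpecList names (names.take k) suf = (List.range' k suf.length).map (pvTarget names) := by
  induction suf with
  | nil => intro k _; simp [pvSpecList]
  | cons n suf ih =>
    intro k hdrop
    have hk : names[k]? = some n := by
      rw [← List.head?_drop, hdrop]; rfl
    have hget : names.getD k "" = n := by
      simp [List.getD, hk]
    have htake : names.take (k + 1) = names.take k ++ [n] := by
      rw [List.take_add_one, hk]; rfl
    have hdrop' : names.drop (k + 1) = suf := by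
      rw [← List.tail_drop, hdrop]; rfl
    simp only [pvSpecList, List.length_cons, List.range'_succ, List.map_cons]
    refine List.cons_eq_cons.mpr ⟨?_, ?_⟩
    · simp only [pvTarget, hget, htake, List.count_append, List.count_singleton]
      split
      · rfl
      · simp
    · rw [← htake, ih (k + 1) hdrop']

-- positions (with offset k) at which a given name occurs
def pvPosAux (names : List String) (k : Nat) (m : String) : List Nat :=
  ((names.zipIdx k).filter (fun p => p.1 == m)).map (·.2)

theorem pvPosAux_cons (x : String) (xs : List String) (k : Nat) (m : String) :
    pvPosAux (x :: xs) k m =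
      if x = m then k :: pvPosAux xs (k + 1) m else pvPosAux xs (k + 1) m := by
  simp only [pvPosAux, List.zipIdx_cons, List.filter_cons]
  split_ifs with h <;> simp_all

theorem pvPosAux_mem (xs : List String) : ∀ (k : Nat) (m : String) (i : Nat),
    i ∈ pvPosAux xs k m ↔ (k ≤ i ∧ i - k < xs.length ∧ xs.getD (i - k) "" = m) := by
  induction xs with
  | nil => intro k m i; simp [pvPosAux]
  | cons x xs ih =>
    intro k m i
    rw [pvPosAux_cons]
    by_cases hx : x = m
    · rw [if_pos hx, List.mem_cons, ih (k + 1)]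
      constructor
      · rintro (rfl | ⟨h1, h2, h3⟩)
        · subst hx
          exact ⟨le_refl _, by simp, by simp⟩
        · refine ⟨by omega, by simp only [List.length_cons]; omega, ?_⟩
          have he : i - k = (i - (k + 1)) + 1 := by omega
          rw [he]
          simpa using h3
      · rintro ⟨h1, h2, h3⟩
        rcases eq_or_lt_of_le h1 with rfl | hlt
        · left; rfl
        · right
          refine ⟨by omega, by simp only [List.length_cons] at h2; omega, ?_⟩
          have he : i - k = (i - (k + 1)) + 1 := by omega
          rw [he] at h3
          simpa using h3
    · rw [if_neg hx, ih (k + 1)]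
      constructor
      · rintro ⟨h1, h2, h3⟩
        refine ⟨by omega, by simp only [List.length_cons]; omega, ?_⟩
        have he : i - k = (i - (k + 1)) + 1 := by omega
        rw [he]
        simpa using h3
      · rintro ⟨h1, h2, h3⟩
        have hik : i ≠ k := by
          rintro rfl
          simp at h3
          exact hx h3
        refine ⟨by omega, by simp only [List.length_cons] at h2; omega, ?_⟩
        have he : i - k = (i - (k + 1)) + 1 := by omega
        rw [he] at h3
        simpa using h3

theorem pvPosAux_length (xs : List String) : ∀ (k : Nat) (m : String),
    (pvPosAux xs k m).length = xs.count m := by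
  induction xs with
  | nil => intro k m; simp [pvPosAux]
  | cons x xs ih =>
    intro k m
    rw [pvPosAux_cons, List.count_cons]
    by_cases h : x = m
    · simp [h, ih]
    · simp [beq_iff_eq, h, ih]

theorem pvPosAux_lb (xs : List String) : ∀ (k : Nat) (m : String) (i : Nat),
    i ∈ pvPosAux xs k m → k ≤ i := by
  intro k m i h
  exact ((pvPosAux_mem xs k m i).mp h).1

theorem pvPosAux_pairwise (xs : List String) : ∀ (k : Nat) (m : String),
    (pvPosAux xs k m).Pairwise (· < ·) := by
  induction xs with
  | nil => intro k m; simp [pvPosAux]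
  | cons x xs ih =>
    intro k m
    rw [pvPosAux_cons]
    split_ifs with h
    · refine List.pairwise_cons.mpr ⟨?_, ih (k + 1) m⟩
      intro j hj
      have := pvPosAux_lb xs (k + 1) m j hj
      omega
    · exact ih (k + 1) m

theorem pvPosAux_idxOf (xs : List String) : ∀ (k : Nat) (m : String) (i : Nat),
    i ∈ pvPosAux xs k m → (pvPosAux xs k m).idxOf i = (xs.take (i - k)).count m := by
  induction xs with
  | nil => intro k m i h; simp [pvPosAux] at h
  | cons x xs ih =>
    intro k m i hmem
    have hk : k ≤ i := pvPosAux_lb _ _ _ _ hmem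
    rw [pvPosAux_cons] at hmem ⊢
    by_cases hx : x = m
    · subst hx
      rw [if_pos rfl] at hmem ⊢
      rcases eq_or_ne i k with rfl | hne
      · simp [List.idxOf_cons]
      · have hmem' : i ∈ pvPosAux xs (k + 1) x := by
          rcases List.mem_cons.mp hmem with h | h
          · exact absurd h hne
          · exact h
        have hik : k + 1 ≤ i := pvPosAux_lb _ _ _ _ hmem'
        have htake : i - k = (i - (k + 1)) + 1 := by omega
        have hki : (k == i) = false := by simpa using Ne.symm hne
        simp only [List.idxOf_cons, hki, cond_false]
        rw [htake, List.take_succ_cons, List.count_cons_self, ih (k + 1) x i hmem']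
    · rw [if_neg hx] at hmem ⊢
      have hik : k + 1 ≤ i := pvPosAux_lb _ _ _ _ hmem
      have htake : i - k = (i - (k + 1)) + 1 := by omega
      rw [ih (k + 1) m i hmem, htake]
      simp [List.count_cons, hx]

-- pvScatter's three arms, as equations
theorem pvScatter_eq_nil (res : List String) (m : String) :
    pvScatter res (m, []) = res := rfl
theorem pvScatter_eq_one (res : List String) (m : String) (p : Nat) :
    pvScatter res (m, [p]) = res.set p m := rfl
theorem pvScatter_eq_big (res : List String) (m : String) (p p2 : Nat) (rest : List Nat) :
    pvScatter res (m, p :: p2 :: rest) =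
      ((p :: p2 :: rest).zipIdx 1).foldl
        (fun r t => r.set t.1 (m ++ "_" ++ PySem.Int.toStr (t.2 : Int))) res := rfl

-- the scatter inner fold: length, untouched indices, touched indices
theorem pvScatterFold_length (f : Nat → String) (ps : List Nat) :
    ∀ (s : Nat) (res : List String),
      (((ps.zipIdx s).foldl (fun r t => r.set t.1 (f t.2)) res)).length = res.length := by
  induction ps with
  | nil => intro s res; rfl
  | cons p ps ih =>
    intro s res
    simp only [List.zipIdx_cons, List.foldl_cons]
    rw [ih (s + 1)]
    simp

theorem pvScatterFold_not_mem (f : Nat → String) (ps : List Nat) :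
    ∀ (s : Nat) (res : List String) (i : Nat), i ∉ ps →
      (((ps.zipIdx s).foldl (fun r t => r.set t.1 (f t.2)) res))[i]? = res[i]? := by
  induction ps with
  | nil => intro s res i _; rfl
  | cons p ps ih =>
    intro s res i hi
    simp only [List.zipIdx_cons, List.foldl_cons]
    rw [ih (s + 1) _ i (fun h => hi (List.mem_cons_of_mem _ h))]
    exact List.getElem?_set_ne (fun h => hi (by rw [h]; exact List.mem_cons_self))

theorem pvScatterFold_mem (f : Nat → String) (ps : List Nat) :
    ∀ (s : Nat) (res : List String) (i : Nat),
      ps.Pairwise (· < ·) → i ∈ ps → i < res.length →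
      (((ps.zipIdx s).foldl (fun r t => r.set t.1 (f t.2)) res))[i]? =
        some (f (s + ps.idxOf i)) := by
  induction ps with
  | nil => intro s res i _ h _; simp at h
  | cons p ps ih =>
    intro s res i hpw hi hlen
    have hpw' := List.pairwise_cons.mp hpw
    simp only [List.zipIdx_cons, List.foldl_cons]
    rcases eq_or_ne i p with rfl | hne
    · have hnot : i ∉ ps := fun h => absurd (hpw'.1 i h) (by omega)
      rw [pvScatterFold_not_mem f ps (s + 1) _ i hnot]
      rw [List.getElem?_set_self hlen]
      simp [List.idxOf_cons]
    · have hi' : i ∈ ps := by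
        rcases List.mem_cons.mp hi with h | h
        · exact absurd h hne
        · exact h
      rw [ih (s + 1) _ i hpw'.2 hi' (by simpa using hlen)]
      have hpi : (p == i) = false := by simpa using Ne.symm hne
      simp only [List.idxOf_cons, hpi, cond_false]
      have harg : s + 1 + List.idxOf i ps = s + (List.idxOf i ps + 1) := by omega
      rw [harg]

theorem pvScatter_length (res : List String) (q : String × List Nat) :
    (pvScatter res q).length = res.length := by
  rcases q with ⟨m, ps⟩
  rcases ps with _ | ⟨p, _ | ⟨p2, rest⟩⟩
  · rfl
  · rw [pvScatter_eq_one]; simp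
  · rw [pvScatter_eq_big]
    exact pvScatterFold_length (fun k => m ++ "_" ++ PySem.Int.toStr (k : Int))
      (p :: p2 :: rest) 1 res

-- a group of a different name leaves index i alone
theorem pvScatter_untouched (names : List String) (res : List String) (m : String)
    (i : Nat) (hi : i < names.length) (hne : names.getD i "" ≠ m) :
    (pvScatter res (m, pvPosAux names 0 m))[i]? = res[i]? := by
  have hnot : i ∉ pvPosAux names 0 m := by
    intro h
    have h2 := (pvPosAux_mem names 0 m i).mp h
    simp at h2
    exact hne h2.2
  set ps := pvPosAux names 0 m with hps
  clear_value ps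
  rcases ps with _ | ⟨p, _ | ⟨p2, rest⟩⟩
  · rw [pvScatter_eq_nil]
  · rw [pvScatter_eq_one]
    have hpi : p ≠ i := by simp at hnot; omega
    exact List.getElem?_set_ne hpi
  · rw [pvScatter_eq_big]
    exact pvScatterFold_not_mem (fun k => m ++ "_" ++ PySem.Int.toStr (k : Int))
      (p :: p2 :: rest) 1 res i hnot

-- the group of i's own name writes exactly pvTarget at i
theorem pvScatter_touched (names : List String) (res : List String)
    (i : Nat) (hi : i < names.length) (hlen : res.length = names.length) :
    (pvScatter res (names.getD i "", pvPosAux names 0 (names.getD i "")))[i]? =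
      some (pvTarget names i) := by
  set m := names.getD i "" with hm
  have hmem : i ∈ pvPosAux names 0 m := by
    rw [pvPosAux_mem]
    exact ⟨Nat.zero_le _, by simpa using hi, by simpa using hm.symm⟩
  have hcnt : (pvPosAux names 0 m).length = names.count m := pvPosAux_length _ _ _
  have hidx : (pvPosAux names 0 m).idxOf i = (names.take i).count m := by
    simpa using pvPosAux_idxOf names 0 m i hmem
  have hpw : (pvPosAux names 0 m).Pairwise (· < ·) := pvPosAux_pairwise _ _ _
  have htake1 : (names.take (i + 1)).count m = (names.take i).count m + 1 := by
    have hget : names[i]? = some m := by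
      rw [hm, List.getD_eq_getElem?_getD]
      rcases h : names[i]? with _ | v
      · exact absurd (List.getElem?_eq_some_iff.mpr ⟨hi, rfl⟩).symm (by simp [h])
      · rfl
    rw [List.take_add_one, hget]
    simp [List.count_append]
  set ps := pvPosAux names 0 m with hps
  clear_value ps
  rcases ps with _ | ⟨p, _ | ⟨p2, rest⟩⟩
  · simp at hmem
  · -- singleton group: count = 1, bare name
    have h1 : names.count m = 1 := by rw [← hcnt]; rfl
    have hip : i = p := by simpa using hmem
    subst hip
    rw [pvScatter_eq_one, List.getElem?_set_self (by omega)]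
    rw [pvTarget, ← hm, if_pos h1]
  · -- larger group: count ≥ 2, suffixed name
    have h2 : names.count m = rest.length + 2 := by rw [← hcnt]; simp
    rw [pvScatter_eq_big]
    have hfold := pvScatterFold_mem (fun k => m ++ "_" ++ PySem.Int.toStr (k : Int))
      (p :: p2 :: rest) 1 res i hpw hmem (by omega)
    rw [hidx, Nat.add_comm 1] at hfold
    refine hfold.trans ?_
    rw [pvTarget, ← hm, if_neg (by omega), htake1]

-- folding all groups: length is preserved
theorem pvFill_length (L : List (String × List Nat)) :
    ∀ (res : List String), (L.foldl pvScatter res).length = res.length := by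
  induction L with
  | nil => intro res; rfl
  | cons q L ih => intro res; rw [List.foldl_cons, ih, pvScatter_length]

-- folding all groups: index i receives pvTarget iff its name is among the group keys
theorem pvFill (names : List String) (L : List (String × List Nat)) :
    ∀ (res : List String), res.length = names.length →
      (∀ q ∈ L, q.2 = pvPosAux names 0 q.1) →
      ∀ i, i < names.length →
        (L.foldl pvScatter res)[i]? =
          if names.getD i "" ∈ L.map Prod.fst then some (pvTarget names i) else res[i]? := by
  induction L with
  | nil => intro res _ _ i _; simp
  | cons q L ih =>
    intro res hlen hq i hi
    have hq1 : q.2 = pvPosAux names 0 q.1 := hq q List.mem_cons_self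
    have hqe : q = (q.1, pvPosAux names 0 q.1) := by
      rcases q with ⟨m, v⟩; simpa using hq1
    have hlen' : (pvScatter res q).length = res.length := pvScatter_length res q
    simp only [List.foldl_cons, List.map_cons]
    rw [ih (pvScatter res q) (by rw [hlen', hlen])
        (fun q' h => hq q' (List.mem_cons_of_mem _ h)) i hi]
    by_cases he : names.getD i "" = q.1
    · have htouch : (pvScatter res q)[i]? = some (pvTarget names i) := by
        rw [hqe, ← he]
        exact pvScatter_touched names res i hi hlen
      rw [if_pos (List.mem_cons.mpr (Or.inl he))]
      by_cases h2 : names.getD i "" ∈ L.map Prod.fst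
      · rw [if_pos h2]
      · rw [if_neg h2]
        exact htouch
    · have huntouch : (pvScatter res q)[i]? = res[i]? := by
        rw [hqe]
        exact pvScatter_untouched names res q.1 i hi he
      by_cases h2 : names.getD i "" ∈ L.map Prod.fst
      · rw [if_pos h2, if_pos (List.mem_cons.mpr (Or.inr h2))]
      · rw [if_neg h2, if_neg (by rw [List.mem_cons]; push_neg; exact ⟨he, h2⟩)]
        exact huntouch

-- B's two phases over an abstract name list compute the positional reference list
theorem pvB_core (names : List String) :
    ((names.zipIdx).foldl (fun g p => g.modify p.1 [] (· ++ [p.2]))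
        PySem.Dict.empty).items.foldl pvScatter (List.replicate names.length "")
      = (List.range' 0 names.length).map (pvTarget names) := by
  set groups := (names.zipIdx).foldl (fun g p => g.modify p.1 [] (· ++ [p.2]))
      PySem.Dict.empty with hgroups
  have hnd : groups.keys.Nodup := by
    rw [hgroups]
    exact PySem.Dict.nodup_keys_foldl_modify_key (names.zipIdx) Prod.fst []
      (fun _ p => (· ++ [p.2])) PySem.Dict.empty (by simp [PySem.Dict.keys_empty])
  have hkeys : groups.keys = PySem.Set.ofList names := by
    rw [hgroups, PySem.Dict.keys_foldl_modify_key, PySem.Dict.keys_empty,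
        PySem.Set.update_nil_left, List.zipIdx_map_fst]
  have hitems : ∀ q ∈ groups.items, q.2 = pvPosAux names 0 q.1 := by
    rintro ⟨m, v⟩ hmv
    have hget : groups.get? m = some v := PySem.Dict.get?_of_mem_items groups hmv hnd
    have hgetD : groups.getD m [] = v := PySem.Dict.getD_of_get?_eq_some groups [] hget
    rw [← hgetD, hgroups, PySem.Dict.getD_foldl_modify_append, PySem.Dict.getD_empty]
    rfl
  have hrepl : (List.replicate names.length "").length = names.length := by simp
  apply List.ext_getElem?
  intro i
  by_cases hi : i < names.length
  · rw [pvFill names groups.items _ hrepl hitems i hi]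
    have hkeyeq : groups.items.map Prod.fst = groups.keys := rfl
    have hmem : names.getD i "" ∈ groups.items.map Prod.fst := by
      rw [hkeyeq, hkeys, PySem.Set.mem_ofList]
      have hsome : names[i]? = some (names.getD i "") := by
        rw [List.getD_eq_getElem?_getD]
        rcases h : names[i]? with _ | v
        · exact absurd (List.getElem?_eq_some_iff.mpr ⟨hi, rfl⟩).symm (by simp [h])
        · rfl
      exact List.mem_of_getElem? hsome
    rw [if_pos hmem, List.getElem?_map, List.getElem?_range']
    · simp
    · exact hi
  · rw [List.getElem?_eq_none (by rw [pvFill_length, hrepl]; omega),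
        List.getElem?_eq_none (by simp; omega)]

-- B is its two phases applied to the extracted name list
theorem pvB_eq (image_infos : List (List (String × String))) :
    generate_element_names_py_alt image_infos =
      (List.range' 0 (image_infos.map (fun info => pvReq info)).length).map
        (pvTarget (image_infos.map (fun info => pvReq info))) := by
  simp only [generate_element_names_py_alt]
  rw [show image_infos.length = (image_infos.map (fun info => pvReq info)).length by simp]
  exact pvB_core _

-- A computes the positional reference list
theorem pvA_eq (image_infos : List (List (String × String))) :
    generate_element_names_py image_infos =
      (List.range' 0 (image_infos.map (fun info => pvReq info)).length).map
        (pvTarget (image_infos.map (fun info => pvReq info))) := by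
  simp only [generate_element_names_py, PySem.Dict.getD_counter]
  rw [pvA_loop (image_infos.map (fun info => pvReq info)) image_infos [] [] PySem.Dict.empty
      (by intro m _; simp [PySem.Dict.getD_empty])]
  rw [show ([] : List String) = (image_infos.map (fun info => pvReq info)).take 0 from rfl]
  rw [pvSpec_eq_range (image_infos.map (fun info => pvReq info)) _ 0 (by simp)]
  simp

-- ===== VERDICT (by name: the statement is the Claim_ definition above) =====
theorem generate_element_names_py_spec : Claim_equal_generate_element_names_py := by
  intro image_infos _ _
  show generate_element_names_py image_infos = generate_element_names_py_alt image_infos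
  rw [pvA_eq, pvB_eq]
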